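-- pv_equiv track=rewrite | github.com/killerloop85/ios-routing | scripts/smoke_check.py | find_parent_conflicts
-- ===== SOURCE A (Python) =====
-- def find_parent_conflicts(domains: list[str]) -> list[tuple[str, str]]:
--     ordered = sorted(set(domains), key=lambda item: (item.count("."), item))
--     conflicts: list[tuple[str, str]] = []
--     parents: list[str] = []
--     for domain in ordered:
--         for parent in parents:
--             if domain.endswith("." + parent):
--                 conflicts.append((parent, domain))
--                 break
--         parents.append(domain)
--     return conflicts
-- ===== SOURCE B (Python) =====
-- def find_parent_conflicts(domains: list[str]) -> list[tuple[str, str]]: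
--     # Same result as scanning all previously-seen parents, but found by probing
--     # each domain's own dot-suffixes (rightmost dot first) against a hash set.
--     pool = set(domains)
--     ordered = sorted(pool, key=lambda item: (item.count("."), item))
--     conflicts: list[tuple[str, str]] = []
--     for domain in ordered:
--         for i in range(len(domain) - 1, -1, -1):
--             if domain[i] == "." and domain[i + 1:] in pool:
--                 conflicts.append((domain[i + 1:], domain))
--                 break
--     return conflicts
-- ===== Notes on version B (the rewrite author's own statement) =====
-- stated objective: faster
-- what changed: Instead of scanning the growing list of previously-seen parents with endswith for each domain, B enumerates each domain's own dot-suffixes from the rightmost dot and probes them against a hash set of all domains (a suffix always has strictly fewer dots, so it is always sorted earlier).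
import Mathlib
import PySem

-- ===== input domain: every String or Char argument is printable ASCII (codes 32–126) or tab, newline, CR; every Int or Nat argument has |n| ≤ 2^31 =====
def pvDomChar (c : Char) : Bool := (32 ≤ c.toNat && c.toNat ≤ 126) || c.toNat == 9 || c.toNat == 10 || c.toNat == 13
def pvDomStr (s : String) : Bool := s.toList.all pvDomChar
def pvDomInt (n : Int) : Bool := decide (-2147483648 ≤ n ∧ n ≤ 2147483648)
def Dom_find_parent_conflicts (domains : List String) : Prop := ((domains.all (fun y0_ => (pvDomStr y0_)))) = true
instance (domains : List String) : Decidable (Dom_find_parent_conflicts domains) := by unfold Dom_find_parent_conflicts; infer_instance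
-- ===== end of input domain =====

-- B replaces A's inner scan over all previously-kept parents with a probe of the
-- domain's own dot-suffixes (rightmost dot first) against the deduplicated set.

-- ===== PORT A =====
-- '.' :: parent.toList is ("." + parent).toList; List.find? is the for/break scan over parents.
def find_parent_conflicts (domains : List String) : List (String × String) :=
  let ordered := PySem.List.sorted2 (PySem.Set.ofList domains)
      (fun item => PySem.Str.count item ".") (fun item => item) false
  (ordered.foldl
    (fun (st : List (String × String) × List String) domain =>
      match st.2.find? (fun parent => PySem.Chars.endswith domain.toList ('.' :: parent.toList)) with
      | some parent => (st.1 ++ [(parent, domain)], st.2 ++ [domain])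
      | none => (st.1, st.2 ++ [domain]))
    ([], [])).1

-- ===== PORT B =====
-- the inner 'for i in range(len(domain)-1, -1, -1)' with its break: the argument n
-- is i+1, so n = 0 means the range is exhausted; domain[i] is toList[i]? (always in
-- range here), and the slice domain[i+1:] with a nonnegative bound is drop (i+1).
def pvAltScan (pool : PySem.Set String) (domain : String) : Nat → Option (String × String)
  | 0 => none
  | i + 1 =>
      if (domain.toList[i]? == some '.')
          && pool.contains (String.ofList (domain.toList.drop (i + 1))) then
        some (String.ofList (domain.toList.drop (i + 1)), domain)
      else pvAltScan pool domain i

def find_parent_conflicts_alt (domains : List String) : List (String × String) :=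
  let pool := PySem.Set.ofList domains
  let ordered := PySem.List.sorted2 pool
      (fun item => PySem.Str.count item ".") (fun item => item) false
  ordered.foldl
    (fun conflicts domain =>
      match pvAltScan pool domain domain.toList.length with
      | some pr => conflicts ++ [pr]
      | none => conflicts) []

-- ===== PRECONDITION & SPEC =====
def Spec_find_parent_conflicts (domains : List String) (out : List (String × String)) : Prop := out = find_parent_conflicts_alt domains
instance (domains : List String) (out : List (String × String)) : Decidable (Spec_find_parent_conflicts domains out) := by unfold Spec_find_parent_conflicts; infer_instance

-- ===== CLAIM (what is proved, stated in full; the proofs are below) =====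
def Claim_equal_find_parent_conflicts : Prop := ∀ (domains : List String), Dom_find_parent_conflicts domains → Spec_find_parent_conflicts domains (find_parent_conflicts domains)

-- ===== LEMMAS AND PROOFS =====

-- the sort key of A's `sorted(..., key=lambda item: (item.count("."), item))`, as one lex pair
def pvKey (d : String) : Lex (Nat × String) := toLex (PySem.Chars.count d.toList ['.'], d)

-- Chars.count with a single-character needle is List.count
theorem pvCount_go_singleton (ch : Char) :
    ∀ (fuel : Nat) (l : List Char) (acc : Nat), l.length ≤ fuel →
      PySem.Chars.count.go [ch] fuel l acc = acc + l.count ch := by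
  intro fuel
  induction fuel with
  | zero => intro l acc h; rw [List.length_eq_zero_iff.mp (Nat.le_zero.mp h)]; simp [PySem.Chars.count.go]
  | succ n ih =>
    intro l acc h
    cases l with
    | nil => simp [PySem.Chars.count.go]
    | cons c t =>
      have hlt : t.length ≤ n := by simpa using h
      by_cases hc : (ch == c) = true
      · have hceq : c = ch := ((beq_iff_eq).mp hc).symm
        simp [PySem.Chars.count.go, List.isPrefixOf, ih _ _ hlt, hceq]
        omega
      · have hne : c ≠ ch := fun h' => hc (by simp [h'])
        simp [PySem.Chars.count.go, List.isPrefixOf, hc, ih _ _ hlt, hne]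

theorem pvCount_singleton (s : List Char) (ch : Char) :
    PySem.Chars.count s [ch] = s.count ch := by
  simp [PySem.Chars.count, pvCount_go_singleton ch s.length s 0 le_rfl]

-- dropping past a dot strictly decreases the dot count
theorem pvCount_drop_lt (l : List Char) (j : Nat) (hj : l[j]? = some '.') :
    (l.drop (j + 1)).count '.' < l.count '.' := by
  have hlen : j < l.length := by
    by_contra h
    simp [List.getElem?_eq_none (le_of_not_gt h)] at hj
  have hdec : l = l.take j ++ l[j] :: l.drop (j + 1) := by
    rw [← List.drop_eq_getElem_cons hlen, List.take_append_drop]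
  have hdot : l[j] = '.' := by
    have := List.getElem?_eq_getElem hlen; rw [this] at hj; exact Option.some_injective _ hj
  conv_rhs => rw [hdec]
  simp [List.count_append, hdot]
  omega

-- Chars.endswith d ('.'::p) says p is the suffix of d after some dot
theorem pvEndswith_iff (d p : List Char) :
    PySem.Chars.endswith d ('.' :: p) = true ↔ ∃ i, d[i]? = some '.' ∧ p = d.drop (i + 1) := by
  rw [PySem.Chars.endswith_iff]
  constructor
  · rintro ⟨t, ht⟩
    refine ⟨t.length, ?_, ?_⟩
    · rw [← ht]; simp
    · rw [← ht]; simp [List.drop_append]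
  · rintro ⟨i, hdot, hp⟩
    have hlen : i < d.length := by
      by_contra h
      simp [List.getElem?_eq_none (le_of_not_gt h)] at hdot
    refine ⟨d.take i, ?_⟩
    have hcons := List.drop_eq_getElem_cons hlen
    have hdot' : d[i] = '.' := by
      have h2 := List.getElem?_eq_getElem hlen; rw [h2] at hdot; exact Option.some_injective _ hdot
    rw [hp, ← hdot', ← hcons, List.take_append_drop]

-- A's tuple comparison (count first, then the string) is the lex order under pvKey
theorem pvBefore_eq :
    (fun a b : String => decide (PySem.Str.count a "." < PySem.Str.count b ".")
        || (!decide (PySem.Str.count b "." < PySem.Str.count a ".") && decide (a < b)))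
      = fun a b => decide (pvKey a < pvKey b) := by
  funext a b
  have hdot : (".".toList) = ['.'] := by decide
  rw [Bool.eq_iff_iff]
  simp only [Bool.or_eq_true, Bool.and_eq_true, Bool.not_eq_eq_eq_not, Bool.not_true,
    decide_eq_true_eq, decide_eq_false_iff_not, pvKey, Prod.Lex.lt_iff, ofLex_toLex,
    PySem.Str.count_eq, hdot, not_lt]
  constructor
  · rintro (h | ⟨h1, h2⟩)
    · exact Or.inl h
    · rcases Nat.lt_or_ge (PySem.Chars.count a.toList ['.']) (PySem.Chars.count b.toList ['.']) with h3 | h3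
      · exact Or.inl h3
      · exact Or.inr ⟨le_antisymm h1 h3, h2⟩
  · rintro (h | ⟨h1, h2⟩)
    · exact Or.inl h
    · exact Or.inr ⟨le_of_eq h1, h2⟩

-- sorted2 with the (count, item) tuple key is sorted with pvKey
theorem pvSorted2_eq (xs : List String) :
    PySem.List.sorted2 xs (fun item => PySem.Str.count item ".") (fun item => item) false
      = PySem.List.sorted xs pvKey false := by
  show List.foldl (fun acc x => PySem.List.insertBy
      (fun a b : String => decide (PySem.Str.count a "." < PySem.Str.count b ".")
        || (!decide (PySem.Str.count b "." < PySem.Str.count a ".") && decide (a < b))) x acc) [] xs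
    = List.foldl (fun acc x => PySem.List.insertBy (fun a b => decide (pvKey a < pvKey b)) x acc) [] xs
  rw [pvBefore_eq]

theorem pvOrdered_pairwise (domains : List String) :
    (PySem.List.sorted (PySem.Set.ofList domains) pvKey false).Pairwise
      (fun a b => pvKey a < pvKey b) := by
  have hnd : (PySem.List.sorted (PySem.Set.ofList domains) pvKey false).Nodup :=
    (PySem.List.sorted_perm (PySem.Set.ofList domains) pvKey false).nodup_iff.mpr
      (PySem.Set.nodup_ofList domains)
  have hle := PySem.List.sorted_pairwise (PySem.Set.ofList domains) pvKey
  refine (hnd.and hle).imp ?_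
  rintro a b ⟨hne, hle'⟩
  refine lt_of_le_of_ne hle' (fun h => hne ?_)
  have := congrArg (fun k => (ofLex k).2) h
  simpa [pvKey] using this

-- the matching condition of B's inner scan, as a Prop on the dot position
def pvM (S : List String) (d : String) (i : Nat) : Prop :=
  d.toList[i]? = some '.' ∧ String.ofList (d.toList.drop (i + 1)) ∈ S

theorem pvAltScan_none (S : PySem.Set String) (d : String) (n : Nat)
    (h : ∀ i < n, ¬ pvM S d i) : pvAltScan S d n = none := by
  induction n with
  | zero => rfl
  | succ m ih =>
    have hm := h m (Nat.lt_succ_self m)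
    simp only [pvAltScan]
    rw [if_neg, ih (fun i hi => h i (Nat.lt_succ_of_lt hi))]
    simp only [pvM, not_and_or] at hm
    rcases hm with hm | hm <;> simp [PySem.Set.contains, hm]

theorem pvAltScan_some (S : PySem.Set String) (d : String) (i : Nat) (hMi : pvM S d i) :
    ∀ n, i < n → (∀ j, i < j → j < n → ¬ pvM S d j) →
      pvAltScan S d n = some (String.ofList (d.toList.drop (i + 1)), d) := by
  intro n
  induction n with
  | zero => omega
  | succ m ih =>
    intro hin hmax
    by_cases him : i = m
    · subst him
      obtain ⟨h1, h2⟩ := hMi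
      simp [pvAltScan, h1, PySem.Set.contains, h2]
    · have hlt : i < m := by omega
      have hnm := hmax m hlt (Nat.lt_succ_self m)
      simp only [pvAltScan]
      rw [if_neg, ih hlt (fun j hj hjm => hmax j hj (Nat.lt_succ_of_lt hjm))]
      simp only [pvM, not_and_or] at hnm
      rcases hnm with hm | hm <;> simp [PySem.Set.contains, hm]

-- find? on a strictly key-sorted list returns the minimal-key satisfying element
theorem pvFind_min (ps : List String) (P : String → Bool) (p : String)
    (hpair : ps.Pairwise (fun a b => pvKey a < pvKey b))
    (hmem : p ∈ ps) (hP : P p = true)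
    (hmin : ∀ q ∈ ps, P q = true → pvKey p ≤ pvKey q) :
    ps.find? P = some p := by
  induction ps with
  | nil => cases hmem
  | cons h t ih =>
    by_cases hPh : P h = true
    · have hph : p = h := by
        rcases List.mem_cons.mp hmem with rfl | hmem'
        · rfl
        · have h1 := (List.pairwise_cons.mp hpair).1 p hmem'
          have h2 := hmin h List.mem_cons_self hPh
          exact absurd h1 (not_lt.mpr h2)
      rw [hph]; exact List.find?_cons_of_pos hPh
    · have hph : p ≠ h := fun he => hPh (he ▸ hP)
      have hmem' : p ∈ t := by
        rcases List.mem_cons.mp hmem with rfl | hm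
        · exact absurd rfl hph
        · exact hm
      rw [List.find?_cons_of_neg hPh]
      exact ih (List.pairwise_cons.mp hpair).2 hmem'
        (fun q hq hPq => hmin q (List.mem_cons_of_mem h hq) hPq)

-- CRUX: with ordered = ps ++ d :: rest strictly key-sorted and a permutation of S,
-- A's scan of ps and B's scan of d's dot positions pick the same parent (or none).
theorem pvCrux (S ps rest : List String) (d : String)
    (hperm : (ps ++ d :: rest).Perm S)
    (hpair : (ps ++ d :: rest).Pairwise (fun a b => pvKey a < pvKey b)) :
    pvAltScan S d d.toList.length
      = (ps.find? (fun parent => PySem.Chars.endswith d.toList ('.' :: parent.toList))).map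
          (fun p => (p, d)) := by
  have hlen_of : ∀ i, d.toList[i]? = some '.' → i < d.toList.length := by
    intro i hi
    by_contra h
    simp [List.getElem?_eq_none (le_of_not_gt h)] at hi
  have happ := List.pairwise_append.mp hpair
  have f1 : ∀ i, d.toList[i]? = some '.' →
      pvKey (String.ofList (d.toList.drop (i + 1))) < pvKey d := by
    intro i hdot
    have hc := pvCount_drop_lt d.toList i hdot
    simp only [pvKey, Prod.Lex.lt_iff, ofLex_toLex]
    exact Or.inl (by simpa [pvCount_singleton, String.toList_ofList] using hc)
  have f2 : ∀ i j : Nat, i < j → d.toList[j]? = some '.' →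
      (d.toList.drop (j + 1)).count '.' < (d.toList.drop (i + 1)).count '.' := by
    intro i j hij hdj
    have h1 : (d.toList.drop (i + 1))[j - (i + 1)]? = some '.' := by
      rw [List.getElem?_drop, show (i + 1) + (j - (i + 1)) = j by omega]
      exact hdj
    have h2 := pvCount_drop_lt (d.toList.drop (i + 1)) (j - (i + 1)) h1
    rwa [List.drop_drop, show (i + 1) + (j - (i + 1) + 1) = j + 1 by omega] at h2
  have hps_of : ∀ q : String, q ∈ S → pvKey q < pvKey d → q ∈ ps := by
    intro q hqS hlt
    rcases List.mem_append.mp (hperm.mem_iff.mpr hqS) with h | h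
    · exact h
    · exfalso
      rcases List.mem_cons.mp h with rfl | h'
      · exact absurd hlt (lt_irrefl _)
      · exact absurd hlt (not_lt.mpr ((List.pairwise_cons.mp happ.2.1).1 q h').le)
  haveI : DecidablePred (pvM S d) := fun i => by unfold pvM; infer_instance
  by_cases hex : ∃ i, pvM S d i
  · obtain ⟨i0, hMi0⟩ := hex
    have hi0len : i0 < d.toList.length := hlen_of i0 hMi0.1
    have hMi : pvM S d (Nat.findGreatest (pvM S d) d.toList.length) :=
      Nat.findGreatest_spec (le_of_lt hi0len) hMi0
    set i := Nat.findGreatest (pvM S d) d.toList.length with hi_def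
    have hilen : i < d.toList.length := hlen_of i hMi.1
    have hmax : ∀ j, i < j → j < d.toList.length → ¬ pvM S d j := fun j h1 h2 =>
      Nat.findGreatest_is_greatest h1 (le_of_lt h2)
    rw [pvAltScan_some S d i hMi d.toList.length hilen hmax]
    have hfind : ps.find? (fun parent => PySem.Chars.endswith d.toList ('.' :: parent.toList))
        = some (String.ofList (d.toList.drop (i + 1))) := by
      apply pvFind_min ps _ _ happ.1 (hps_of _ hMi.2 (f1 i hMi.1))
      · exact (pvEndswith_iff d.toList _).mpr ⟨i, hMi.1, by simp [String.toList_ofList]⟩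
      · intro q hq hPq
        obtain ⟨j, hdj, hqj⟩ := (pvEndswith_iff d.toList q.toList).mp hPq
        have hjlen : j < d.toList.length := hlen_of j hdj
        have hqof : String.ofList (d.toList.drop (j + 1)) = q := by
          rw [← hqj, String.ofList_toList]
        have hMj : pvM S d j :=
          ⟨hdj, by rw [hqof]; exact hperm.mem_iff.mp (List.mem_append_left _ hq)⟩
        have hji : j ≤ i := by
          by_contra hj
          exact hmax j (by omega) hjlen hMj
        rcases eq_or_lt_of_le hji with rfl | hjlt
        · exact le_of_eq (congrArg pvKey hqof)
        · apply le_of_lt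
          simp only [pvKey, Prod.Lex.lt_iff, ofLex_toLex]
          refine Or.inl ?_
          have := f2 j i hjlt hMi.1
          simpa [pvCount_singleton, String.toList_ofList, hqj] using this
    rw [hfind]; rfl
  · rw [not_exists] at hex
    rw [pvAltScan_none S d _ (fun i _ => hex i)]
    rw [List.find?_eq_none.mpr ?_]
    · rfl
    · intro q hq hPq
      obtain ⟨j, hdj, hqj⟩ := (pvEndswith_iff d.toList q.toList).mp hPq
      exact hex j ⟨hdj, by rw [← hqj, String.ofList_toList]
                           exact hperm.mem_iff.mp (List.mem_append_left _ hq)⟩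

-- A's fold, with the emitted conflicts made explicit
def pvEmitA (ps : List String) : List String → List (String × String)
  | [] => []
  | d :: t =>
      (match ps.find? (fun parent => PySem.Chars.endswith d.toList ('.' :: parent.toList)) with
        | some p => [(p, d)]
        | none => []) ++ pvEmitA (ps ++ [d]) t

theorem pvAfold (l : List String) : ∀ (c : List (String × String)) (ps : List String),
    l.foldl
      (fun (st : List (String × String) × List String) domain =>
        match st.2.find? (fun parent => PySem.Chars.endswith domain.toList ('.' :: parent.toList)) with
        | some parent => (st.1 ++ [(parent, domain)], st.2 ++ [domain])
        | none => (st.1, st.2 ++ [domain]))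
      (c, ps)
    = (c ++ pvEmitA ps l, ps ++ l) := by
  induction l with
  | nil => intro c ps; simp [pvEmitA]
  | cons d t ih =>
    intro c ps
    simp only [List.foldl_cons, pvEmitA]
    cases hf : ps.find? (fun parent => PySem.Chars.endswith d.toList ('.' :: parent.toList)) with
    | none => simp [ih]
    | some p => simp [ih]

theorem pvBfold (S : PySem.Set String) (l : List String) :
    ∀ (c : List (String × String)),
    l.foldl
      (fun conflicts domain =>
        match pvAltScan S domain domain.toList.length with
        | some pr => conflicts ++ [pr]
        | none => conflicts) c
    = c ++ l.filterMap (fun d => pvAltScan S d d.toList.length) := by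
  induction l with
  | nil => intro c; simp
  | cons d t ih =>
    intro c
    simp only [List.foldl_cons, List.filterMap_cons]
    cases hf : pvAltScan S d d.toList.length with
    | none => exact ih c
    | some pr => rw [ih (c ++ [pr])]; simp

theorem pvMain (S : List String) : ∀ (l ps : List String),
    ((ps ++ l).Perm S) → ((ps ++ l).Pairwise (fun a b => pvKey a < pvKey b)) →
    pvEmitA ps l = l.filterMap (fun d => pvAltScan S d d.toList.length) := by
  intro l
  induction l with
  | nil => intro ps _ _; rfl
  | cons d t ih =>
    intro ps hperm hpair
    have hc := pvCrux S ps t d hperm hpair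
    have hrec : pvEmitA (ps ++ [d]) t
        = t.filterMap (fun x => pvAltScan S x x.toList.length) := by
      refine ih (ps ++ [d]) ?_ ?_
      · simpa using hperm
      · simpa using hpair
    simp only [pvEmitA, List.filterMap_cons]
    cases hf : ps.find? (fun parent => PySem.Chars.endswith d.toList ('.' :: parent.toList)) with
    | none =>
      rw [hf, Option.map_none] at hc
      simp only [hc, List.nil_append]
      exact hrec
    | some p =>
      rw [hf, Option.map_some] at hc
      simp only [hc, List.singleton_append]
      rw [hrec]

-- ===== VERDICT (by name: the statement is the Claim_ definition above) =====
theorem find_parent_conflicts_spec : Claim_equal_find_parent_conflicts := by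
  intro domains _
  unfold Spec_find_parent_conflicts find_parent_conflicts find_parent_conflicts_alt
  simp only [pvSorted2_eq]
  rw [pvAfold, pvBfold]
  simp only [List.nil_append]
  exact (pvMain (PySem.Set.ofList domains)
    (PySem.List.sorted (PySem.Set.ofList domains) pvKey false) []
    (by simpa using PySem.List.sorted_perm (PySem.Set.ofList domains) pvKey false)
    (by simpa using pvOrdered_pairwise domains))
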